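-- pv_equiv track=rewrite | github.com/daesiker/CodingTest | Programmers/110옮기기.py | solution
-- ===== SOURCE A (Python) =====
-- from collections import deque
--
-- def solution(s):
--     answer = []
--
--     for string in s :
--         stack = []
--         count = 0
--
--         for s in string:
--             if s == "0":
--                 #stack 마지막이 ["1", "1"]이라면 카운트 추가 및 stack에서 삭제
--                 if stack[-2:] == ["1", "1"] :
--                     count += 1
--                     stack.pop()
--                     stack.pop()
--                 else :
--                     stack.append(s)
--             else :
--                 stack.append(s)
--
--         if count == 0 :
--             answer.append(string)
--         else :
--             final = deque()
--
--             while stack: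
--                 #stack의 마지막 인덱스부터 0이 있는지 계속확인
--                 if stack[-1] == '1':
--                     final.append(stack.pop())
--                 #사전에서 제일 앞 = 가장 작은 숫자
--                 elif stack[-1] == '0':
--                     break
--             #맨처음 나온 0앞에 110의 개수만큼 추가
--             while count > 0:
--                 final.appendleft('0')
--                 final.appendleft('1')
--                 final.appendleft('1')
--                 count -= 1
--             #stack에 나머지 부분 추가
--             while stack:
--                 final.appendleft(stack.pop())
--             answer.append(''.join(final))
--
--     return answer
-- ===== SOURCE B (Python) =====
-- def solution(s):
--     answer = []
--     for string in s:
--         stack = []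
--         count = 0
--         for ch in string:
--             if ch == "0" and stack[-2:] == ["1", "1"]:
--                 count += 1
--                 stack.pop()
--                 stack.pop()
--             else:
--                 stack.append(ch)
--         if count == 0:
--             answer.append(string)
--         else:
--             reduced = ''.join(stack)
--             i = reduced.rfind('0') + 1
--             answer.append(reduced[:i] + '110' * count + reduced[i:])
--     return answer
-- ===== Notes on version B (the rewrite author's own statement) =====
-- stated objective: simpler
-- what changed: The '110'-removal stack pass is kept, but A's reconstruction via a deque with three while-loops (pop trailing '1's, appendleft the '110' blocks, appendleft the rest) is replaced by joining the stack once and splicing '110'*count right after the last '0' found with rfind.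
-- outside the precondition, e.g. on solution(['110a0']): A returns ['a0110'], B returns ['a0110']; on solution(['110a']): A does not finish within the time limit, B returns ['110a']
import Mathlib
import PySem

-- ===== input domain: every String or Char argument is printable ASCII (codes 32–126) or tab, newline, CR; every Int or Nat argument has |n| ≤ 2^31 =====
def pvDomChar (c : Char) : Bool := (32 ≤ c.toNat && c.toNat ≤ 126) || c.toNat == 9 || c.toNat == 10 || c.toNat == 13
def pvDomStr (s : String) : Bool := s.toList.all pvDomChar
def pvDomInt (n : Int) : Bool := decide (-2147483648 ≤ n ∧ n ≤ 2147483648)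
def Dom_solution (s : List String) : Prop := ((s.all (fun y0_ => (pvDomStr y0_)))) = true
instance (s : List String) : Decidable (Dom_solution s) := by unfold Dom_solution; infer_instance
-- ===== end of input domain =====

-- B replaces A's three-while-loop deque reconstruction by a single rfind-and-splice on the
-- reduced string (objective: simpler); the '110'-removal stack pass is shared by design.

-- ===== PORT A =====

-- inner for-loop body: on '0' with stack[-2:] == ['1','1'] pop twice and count += 1, else append
def pvStepA (st : List Char × Int) (c : Char) : List Char × Int :=
  if c = '0' then
    if PySem.List.slice st.1 (some (-2)) none = ['1', '1'] then
      ((st.1.dropLast).dropLast, st.2 + 1)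
    else (st.1 ++ [c], st.2)
  else (st.1 ++ [c], st.2)

-- first while: pop trailing '1's into final, break on '0'.  On any OTHER top char the Python
-- loop neither pops nor breaks and DIVERGES; there we stop instead — such inputs are outside
-- Pre_solution, which is exactly why Pre_solution exists.
def pvFinalLoopA (st fin : List Char) : List Char × List Char :=
  if st = [] then (st, fin)
  else if PySem.List.pyGet? st (-1) = some '1' then
    pvFinalLoopA st.dropLast (fin ++ ['1'])
  else (st, fin)
termination_by st.length
decreasing_by
  rename_i h _
  have := List.length_pos_of_ne_nil h
  simp [List.length_dropLast]
  omega

-- second while: count times appendleft '0','1','1'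
def pvBlocksA (count : Int) (fin : List Char) : List Char :=
  if 0 < count then pvBlocksA (count - 1) ('1' :: '1' :: '0' :: fin) else fin
termination_by count.toNat

-- third while: appendleft the rest of the stack, popping from the end
def pvPrependA (st fin : List Char) : List Char :=
  if h : st = [] then fin else pvPrependA st.dropLast (st.getLast h :: fin)
termination_by st.length
decreasing_by
  have := List.length_pos_of_ne_nil h
  simp [List.length_dropLast]
  omega

def pvSolveOneA (t : String) : String :=
  let r := t.toList.foldl pvStepA ([], 0)
  if r.2 = 0 then t
  else
    let p := pvFinalLoopA r.1 []
    String.ofList (pvPrependA p.1 (pvBlocksA r.2 p.2))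

def solution (s : List String) : List String :=
  s.foldl (fun answer t => answer ++ [pvSolveOneA t]) []

-- ===== PORT B =====

-- same stack pass, with the two conditions merged into one guard
def pvStepB (st : List Char × Int) (c : Char) : List Char × Int :=
  if c = '0' ∧ PySem.List.slice st.1 (some (-2)) none = ['1', '1'] then
    ((st.1.dropLast).dropLast, st.2 + 1)
  else (st.1 ++ [c], st.2)

-- reconstruction: reduced[:i] + '110'*count + reduced[i:] with i = reduced.rfind('0') + 1
def pvSolveOneB (t : String) : String :=
  let r := t.toList.foldl pvStepB ([], 0)
  if r.2 = 0 then t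
  else
    let reduced := String.ofList r.1
    let i := PySem.Str.rfind reduced "0" + 1
    String.ofList (PySem.List.slice reduced.toList none (some i)
      ++ PySem.List.pyRepeat ['1', '1', '0'] r.2
      ++ PySem.List.slice reduced.toList (some i) none)

def solution_alt (s : List String) : List String :=
  s.foldl (fun answer t => answer ++ [pvSolveOneB t]) []

-- ===== PRECONDITION & SPEC =====

-- spec-level substring scanner: does the string contain "110"?
def pvHas110 : List Char → Bool
  | '1' :: '1' :: '0' :: _ => true
  | _ :: t => pvHas110 t
  | [] => false

-- Pre_ excludes strings that contain "110" together with a character other than '0'/'1':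
-- outside the problem's binary-string domain, and on part of that region (a non-binary char
-- followed only by '1's in the reduced stack) A's reconstruction while-loop diverges.
def Pre_solution (s : List String) : Prop :=
  (s.all fun t => !pvHas110 t.toList || t.toList.all (fun c => c == '0' || c == '1')) = true

instance (s : List String) : Decidable (Pre_solution s) := by
  unfold Pre_solution; infer_instance

def pvWitness_solution : List String := (["110", "ab"])

def Spec_solution (s : List String) (out : List String) : Prop := out = solution_alt s
instance (s : List String) (out : List String) : Decidable (Spec_solution s out) := by
  unfold Spec_solution; infer_instance

-- ===== CLAIM (what is proved, stated in full; the proofs are below) =====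
def Claim_equal_solution : Prop :=
  ∀ (s : List String), Dom_solution s → Pre_solution s → Spec_solution s (solution s)

-- ===== LEMMAS AND PROOFS =====

theorem pvStep_eq : pvStepA = pvStepB := by
  funext st c
  by_cases h0 : c = '0' <;> by_cases h1 : PySem.List.slice st.1 (some (-2)) none = ['1', '1'] <;>
    simp [pvStepA, pvStepB, h0, h1]

-- the count never decreases
theorem pv_count_le (l : List Char) : ∀ st : List Char × Int, st.2 ≤ (l.foldl pvStepB st).2 := by
  induction l with
  | nil => intro st; simp
  | cons c l ih =>
    intro st
    simp only [List.foldl_cons]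
    refine le_trans ?_ (ih (pvStepB st c))
    by_cases h : c = '0' ∧ PySem.List.slice st.1 (some (-2)) none = ['1', '1'] <;>
      simp [pvStepB, h] <;> omega

-- any increment of the count exhibits "110" as an infix of (stack ++ remaining input)
theorem pv_infix_of_count (l : List Char) :
    ∀ st : List Char × Int, (l.foldl pvStepB st).2 ≠ st.2 → ['1', '1', '0'] <:+: st.1 ++ l := by
  induction l with
  | nil => intro st h; simp at h
  | cons c l ih =>
    intro st h
    simp only [List.foldl_cons] at h
    by_cases hc : c = '0' ∧ PySem.List.slice st.1 (some (-2)) none = ['1', '1']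
    · obtain ⟨hc0, hsl⟩ := hc
      rw [PySem.List.slice_from_neg_ofNat st.1 2 (by omega)] at hsl
      refine ⟨st.1.take (st.1.length - 2), l, ?_⟩
      subst hc0
      conv_rhs => rw [← List.take_append_drop (st.1.length - 2) st.1, hsl]
      simp
    · have hst : pvStepB st c = (st.1 ++ [c], st.2) := by simp [pvStepB, hc]
      rw [hst] at h
      have := ih (st.1 ++ [c], st.2) h
      simpa using this
  
-- the stack stays binary on binary input
theorem pv_stack_binary (l : List Char) :
    ∀ st : List Char × Int, (∀ x ∈ st.1, x = '0' ∨ x = '1') → (∀ x ∈ l, x = '0' ∨ x = '1') →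
      ∀ x ∈ (l.foldl pvStepB st).1, x = '0' ∨ x = '1' := by
  induction l with
  | nil => intro st hs _; simpa using hs
  | cons c l ih =>
    intro st hs hl
    simp only [List.foldl_cons]
    refine ih (pvStepB st c) ?_ (fun x hx => hl x (by simp [hx]))
    by_cases h : c = '0' ∧ PySem.List.slice st.1 (some (-2)) none = ['1', '1']
    · intro x hx
      simp only [pvStepB, if_pos h] at hx
      exact hs x (List.mem_of_mem_dropLast (List.mem_of_mem_dropLast hx))
    · intro x hx
      simp only [pvStepB, if_neg h, List.mem_append, List.mem_singleton] at hx
      rcases hx with hx | hx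
      · exact hs x hx
      · exact hl x (by simp [hx])

-- characterisation of A's first while-loop on a binary stack
theorem pvFinalLoop_spec : ∀ st fin : List Char, (∀ x ∈ st, x = '0' ∨ x = '1') →
    ∃ st1 m, st = st1 ++ List.replicate m '1' ∧
      pvFinalLoopA st fin = (st1, fin ++ List.replicate m '1') ∧
      (st1 = [] ∨ st1.getLast? = some '0') := by
  intro st
  induction hn : st.length using Nat.strong_induction_on generalizing st with
  | _ n ih =>
  intro fin hb
  by_cases h : st = []
  · exact ⟨[], 0, by simp [h], by rw [pvFinalLoopA]; simp [h], Or.inl rfl⟩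
  · by_cases h1 : PySem.List.pyGet? st (-1) = some '1'
    · have hlast : st.getLast? = some '1' := by rwa [PySem.List.pyGet?_neg_one] at h1
      have hpos := List.length_pos_of_ne_nil h
      obtain ⟨st1, m, heq, hrun, hend⟩ :=
        ih st.dropLast.length (by simp [List.length_dropLast]; omega) st.dropLast rfl
          (fin ++ ['1']) (fun x hx => hb x (List.mem_of_mem_dropLast hx))
      have hg1 : st.getLast h = '1' := by
        have := List.getLast?_eq_some_getLast h
        rw [hlast] at this; exact (Option.some_inj.mp this).symm
      refine ⟨st1, m + 1, ?_, ?_, hend⟩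
      · conv_lhs => rw [← List.dropLast_concat_getLast h, hg1, heq]
        rw [List.append_assoc, ← List.replicate_succ']
      · rw [pvFinalLoopA, if_neg h, if_pos h1, hrun]
        rw [List.append_assoc, List.replicate_succ]
        rfl
    · refine ⟨st, 0, by simp, ?_, ?_⟩
      · rw [pvFinalLoopA, if_neg h, if_neg h1]; simp
      · right
        rw [PySem.List.pyGet?_neg_one] at h1
        have hx : st.getLast? = some (st.getLast h) := List.getLast?_eq_some_getLast h
        rcases hb _ (List.getLast_mem h) with h0 | h0
        · rw [hx, h0]
        · exact absurd (hx.trans (by rw [h0])) h1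

-- A's third while-loop prepends the whole remaining stack
theorem pvPrepend_eq : ∀ st fin : List Char, pvPrependA st fin = st ++ fin := by
  intro st
  induction hn : st.length using Nat.strong_induction_on generalizing st with
  | _ n ih =>
  intro fin
  by_cases h : st = []
  · rw [pvPrependA]; simp [h]
  · have hpos := List.length_pos_of_ne_nil h
    rw [pvPrependA, dif_neg h,
      ih st.dropLast.length (by simp [List.length_dropLast]; omega) st.dropLast rfl]
    conv_rhs => rw [← List.dropLast_concat_getLast h]
    simp

theorem pvHas110_cons (a : Char) (l : List Char) (h : pvHas110 l = true) :
    pvHas110 (a :: l) = true := by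
  unfold pvHas110
  split
  · rfl
  · next _ t heq =>
    cases heq
    exact h
  · next heq => cases heq

theorem pv_has110_of_infix (l : List Char) (h : ['1', '1', '0'] <:+: l) :
    pvHas110 l = true := by
  obtain ⟨p, q, hpq⟩ := h
  subst hpq
  induction p with
  | nil => rfl
  | cons a p ih => exact pvHas110_cons a _ ih

-- identical blocks commute past their own repetition
theorem pv_flatten_comm (n : Nat) (xs : List Char) :
    (List.replicate n xs).flatten ++ xs = xs ++ (List.replicate n xs).flatten := by
  induction n with
  | zero => simp
  | succ j ihj =>
    rw [List.replicate_succ, List.flatten_cons, List.append_assoc, ihj]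

-- A's second while-loop builds '110' * count in front of the accumulator
theorem pvBlocks_eq : ∀ (n : Nat) (fin : List Char),
    pvBlocksA (n : Int) fin = PySem.List.pyRepeat ['1', '1', '0'] (n : Int) ++ fin := by
  intro n
  induction n with
  | zero => intro fin; rw [pvBlocksA]; simp [PySem.List.pyRepeat]
  | succ k ih =>
    intro fin
    rw [pvBlocksA]
    have h1 : ((k + 1 : Nat) : Int) - 1 = (k : Int) := by push_cast; ring
    rw [if_pos (by positivity), h1, ih]
    simp only [PySem.List.pyRepeat, Int.toNat_natCast]
    rw [List.replicate_succ, List.flatten_cons]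
    rw [show ('1' :: '1' :: '0' :: fin) = ['1','1','0'] ++ fin from rfl,
        ← List.append_assoc, pv_flatten_comm, List.append_assoc]

-- rfind helper: go finds the highest hit below its bound
theorem pv_go_eq (s : List Char) (i : Nat) (hi : ['0'].isPrefixOf (s.drop i) = true)
    (ha : ∀ j, i < j → ¬ (['0'].isPrefixOf (s.drop j) = true)) :
    ∀ n, i ≤ n → PySem.Chars.rfind.go s ['0'] n = (i : Int) := by
  intro n
  induction n with
  | zero =>
    intro h
    have h0 : i = 0 := by omega
    subst h0
    rw [PySem.Chars.rfind.go, if_pos (by simpa using hi)]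
    simp
  | succ k ihk =>
    intro h
    rw [PySem.Chars.rfind.go]
    by_cases he : i = k + 1
    · subst he
      rw [if_pos (by simpa using hi)]
    · rw [if_neg (by simpa using ha (k + 1) (by omega)), ihk (by omega)]

theorem pv_go_none (s : List Char) (ha : ∀ j, ¬ (['0'].isPrefixOf (s.drop j) = true)) :
    ∀ n, PySem.Chars.rfind.go s ['0'] n = -1 := by
  intro n
  induction n with
  | zero => rw [PySem.Chars.rfind.go, if_neg (by simpa using ha 0)]
  | succ k ihk =>
    rw [PySem.Chars.rfind.go]
    rw [if_neg (by simpa using ha (k + 1))]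
    exact ihk

theorem pv_zero_prefix_iff (l : List Char) (j : Nat) :
    ['0'].isPrefixOf (l.drop j) = true ↔ l[j]? = some '0' := by
  rw [← List.head?_drop]
  cases l.drop j with
  | nil => decide
  | cons a t =>
    simp only [List.isPrefixOf, Bool.and_true, beq_iff_eq, List.head?_cons, Option.some_inj]
    exact eq_comm

-- rfind on st1 ++ '1'^m, with st1 empty or ending in '0'
theorem pv_rfind_eq (st1 : List Char) (m : Nat) (hend : st1 = [] ∨ st1.getLast? = some '0') :
    PySem.Chars.rfind (st1 ++ List.replicate m '1') ['0'] = (st1.length : Int) - 1 := by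
  have hhi : ∀ j, st1.length ≤ j → ¬ (['0'].isPrefixOf ((st1 ++ List.replicate m '1').drop j) = true) := by
    intro j hj
    rw [pv_zero_prefix_iff]
    intro hget
    rw [List.getElem?_append_right hj] at hget
    have := List.mem_of_getElem? hget
    simp at this
  rcases hend with h0 | h0
  · subst h0
    have hz : ∀ j, ¬ (['0'].isPrefixOf ((List.replicate m '1').drop j) = true) := by
      intro j
      simp
    rw [PySem.Chars.rfind]
    simp only [List.nil_append, List.length_nil, Nat.cast_zero]
    rw [pv_go_none _ hz]
    decide
  · have hne : st1 ≠ [] := by intro h; rw [h] at h0; simp at h0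
    have hpos := List.length_pos_of_ne_nil hne
    rw [PySem.Chars.rfind]
    rw [pv_go_eq _ (st1.length - 1) ?_ ?_ _ (by simp; omega)]
    · omega
    · rw [pv_zero_prefix_iff, List.getElem?_append_left (by omega), ← List.getLast?_eq_getElem?]
      exact h0
    · intro j hj
      exact hhi j (by omega)

-- per-string agreement
theorem pvSolveOne_eq (t : String)
    (hpre : pvHas110 t.toList = true → ∀ c ∈ t.toList, c = '0' ∨ c = '1') :
    pvSolveOneA t = pvSolveOneB t := by
  simp only [pvSolveOneA, pvSolveOneB, pvStep_eq]
  set r := t.toList.foldl pvStepB ([], 0) with hr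
  by_cases hz : r.2 = 0
  · simp [hz]
  · simp only [if_neg hz]
    have hinf : ['1', '1', '0'] <:+: t.toList := by
      simpa using pv_infix_of_count t.toList ([], 0) (by simpa [← hr] using hz)
    have hbin : ∀ x ∈ r.1, x = '0' ∨ x = '1' := by
      rw [hr]
      exact pv_stack_binary t.toList ([], 0) (by simp) (hpre (pv_has110_of_infix _ hinf))
    obtain ⟨st1, m, heq, hrun, hend⟩ := pvFinalLoop_spec r.1 [] hbin
    have hk0 : (0 : Int) ≤ r.2 := by simpa [← hr] using pv_count_le t.toList ([], 0)
    have hrfind : PySem.Str.rfind (String.ofList r.1) "0" = (st1.length : Int) - 1 := by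
      rw [PySem.Str.rfind_eq]
      simp only [String.toList_ofList]
      rw [heq]
      exact pv_rfind_eq st1 m hend
    rw [hrun, pvPrepend_eq]
    obtain ⟨n, hn⟩ : ∃ n : Nat, r.2 = (n : Int) := ⟨r.2.toNat, by omega⟩
    rw [hn, pvBlocks_eq]
    refine congrArg String.ofList ?_
    rw [hrfind]
    have hi : (st1.length : Int) - 1 + 1 = ((st1.length : Nat) : Int) := by ring
    rw [hi]
    simp only [String.toList_ofList]
    rw [PySem.List.slice_to _ (by positivity), PySem.List.slice_from _ (by positivity)]
    simp only [Int.toNat_natCast]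
    rw [heq, List.take_left, List.drop_left]
    simp

-- ===== VERDICT (by name: the statement is the Claim_ definition above) =====
theorem solution_spec : Claim_equal_solution := by
  intro s _ hpre
  unfold Pre_solution at hpre
  simp only [List.all_eq_true, Bool.or_eq_true, Bool.not_eq_eq_eq_not, Bool.not_true,
    beq_iff_eq] at hpre
  unfold Spec_solution solution solution_alt
  rw [PySem.List.foldl_append_singleton_eq_map, PySem.List.foldl_append_singleton_eq_map]
  simp only [List.nil_append]
  refine List.map_congr_left fun t ht => pvSolveOne_eq t fun h110 c hc => ?_
  rcases hpre t ht with h | h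
  · rw [h110] at h; cases h
  · exact h c hc
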